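-- pv_equiv track=rewrite | github.com/msgr0/PlasEval | scripts/compare/compare_plasmids.py | create_contigs_dict
-- ===== SOURCE A (Python) =====
-- def create_contigs_dict(plasmids_dict):
-- 	contigs_dict = {}
-- 	for plasmid in plasmids_dict:
-- 		for contig in plasmids_dict[plasmid]:
-- 			if contig not in contigs_dict:
-- 				contigs_dict[contig] = {}
-- 				contigs_dict[contig]['length'] = plasmids_dict[plasmid][contig]['length']
-- 				contigs_dict[contig]['copies'] = 0
-- 			contigs_dict[contig]['copies'] += plasmids_dict[plasmid][contig]['copies']
-- 	return contigs_dict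
-- ===== SOURCE B (Python) =====
-- def create_contigs_dict(plasmids_dict):
-- 	# group every contig's info dicts in encounter order, then aggregate per group
-- 	groups = {}
-- 	for plasmid_contigs in plasmids_dict.values():
-- 		for contig, info in plasmid_contigs.items():
-- 			groups.setdefault(contig, []).append(info)
-- 	return {contig: {'length': infos[0]['length'],
-- 	                 'copies': sum(info['copies'] for info in infos)}
-- 	        for contig, infos in groups.items()}
-- ===== Notes on version B (the rewrite author's own statement) =====
-- stated objective: alternative
-- what changed: B replaces A's single-pass conditional in-place accumulation with a two-phase decomposition: first group every contig's info dicts into an encounter-ordered mapping contig -> list of infos, then build the result with a dict comprehension taking 'length' from the first grouped info and summing 'copies' over the group.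
import Mathlib
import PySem

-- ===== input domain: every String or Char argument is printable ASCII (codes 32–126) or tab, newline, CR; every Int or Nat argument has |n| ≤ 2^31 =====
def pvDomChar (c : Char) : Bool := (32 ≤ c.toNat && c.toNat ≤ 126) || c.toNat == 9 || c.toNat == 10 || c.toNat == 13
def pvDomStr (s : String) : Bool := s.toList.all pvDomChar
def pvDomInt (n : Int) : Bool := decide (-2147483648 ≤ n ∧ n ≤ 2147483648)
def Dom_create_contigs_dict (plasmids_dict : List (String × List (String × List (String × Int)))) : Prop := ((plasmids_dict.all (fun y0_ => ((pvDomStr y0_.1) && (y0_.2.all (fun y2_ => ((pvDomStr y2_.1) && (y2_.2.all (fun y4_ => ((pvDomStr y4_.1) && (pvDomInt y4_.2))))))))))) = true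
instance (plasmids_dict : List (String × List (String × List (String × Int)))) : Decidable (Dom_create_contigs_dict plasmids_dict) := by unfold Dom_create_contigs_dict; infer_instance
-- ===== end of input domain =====

-- B regroups the work into two phases (collect every contig's info dicts per contig, then
-- aggregate: 'length' from the first occurrence, 'copies' as a sum) instead of A's in-place
-- conditional accumulation; objective: alternative decomposition, same cost.

-- ===== PORT A =====
-- loop body of A's inner 'for contig in plasmids_dict[plasmid]' (kept as a named helper)
def pvStepA (acc : PySem.Dict String (PySem.Dict String Int))
    (cp : String × List (String × Int)) : PySem.Dict String (PySem.Dict String Int) :=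
  let acc1 :=
    if acc.contains cp.1 then acc
    else acc.insert cp.1
      ((PySem.Dict.empty.insert "length" ((PySem.Dict.mk cp.2).getD "length" 0)).insert "copies" 0)
  acc1.modify cp.1 PySem.Dict.empty
    (fun inner => inner.modify "copies" 0 (· + (PySem.Dict.mk cp.2).getD "copies" 0))

def create_contigs_dict (plasmids_dict : List (String × List (String × List (String × Int)))) : List (String × List (String × Int)) :=
  ((plasmids_dict.foldl (fun acc pp => pp.2.foldl pvStepA acc)
      (PySem.Dict.empty : PySem.Dict String (PySem.Dict String Int))).items).map
    (fun kv => (kv.1, kv.2.items))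

-- ===== PORT B =====
-- loop body of B's grouping phase: groups.setdefault(contig, []).append(info)
def pvStepB (g : PySem.Dict String (List (List (String × Int))))
    (cp : String × List (String × Int)) : PySem.Dict String (List (List (String × Int))) :=
  g.modify cp.1 [] (· ++ [cp.2])

def create_contigs_dict_alt (plasmids_dict : List (String × List (String × List (String × Int)))) : List (String × List (String × Int)) :=
  let groups : PySem.Dict String (List (List (String × Int))) :=
    plasmids_dict.foldl (fun g pp => pp.2.foldl pvStepB g) PySem.Dict.empty
  groups.items.map (fun kv =>
    (kv.1, [("length", (PySem.Dict.mk (kv.2.headD [])).getD "length" 0),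
            ("copies", (kv.2.map (fun cd => (PySem.Dict.mk cd).getD "copies" 0)).sum)]))

-- ===== PRECONDITION & SPEC =====
-- Pre_ excludes exactly the inputs where the Python A raises KeyError: a contig whose info
-- dict lacks the key "copies", or whose FIRST occurrence (in traversal order) lacks "length".
def pvPreAux (seen : List String) : List (String × List (String × Int)) → Bool
  | [] => true
  | cp :: rest =>
    (cp.2.map (·.1)).contains "copies"
      && (seen.contains cp.1 || (cp.2.map (·.1)).contains "length")
      && pvPreAux (cp.1 :: seen) rest

def Pre_create_contigs_dict (plasmids_dict : List (String × List (String × List (String × Int)))) : Prop :=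
  pvPreAux [] (plasmids_dict.flatMap (·.2)) = true
instance (plasmids_dict : List (String × List (String × List (String × Int)))) : Decidable (Pre_create_contigs_dict plasmids_dict) := by unfold Pre_create_contigs_dict; infer_instance

def pvWitness_create_contigs_dict : (List (String × List (String × List (String × Int)))) :=
  [("p1", [("c1", [("length", 5), ("copies", 2)])]),
   ("p2", [("c1", [("copies", 1)]), ("c2", [("length", 3), ("copies", 4)])])]

def Spec_create_contigs_dict (plasmids_dict : List (String × List (String × List (String × Int)))) (out : List (String × List (String × Int))) : Prop := out = create_contigs_dict_alt plasmids_dict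
instance (plasmids_dict : List (String × List (String × List (String × Int)))) (out : List (String × List (String × Int))) : Decidable (Spec_create_contigs_dict plasmids_dict out) := by unfold Spec_create_contigs_dict; infer_instance

-- ===== CLAIM (what is proved, stated in full; the proofs are below) =====
def Claim_equal_create_contigs_dict : Prop := ∀ (plasmids_dict : List (String × List (String × List (String × Int)))), Dom_create_contigs_dict plasmids_dict → Pre_create_contigs_dict plasmids_dict → Spec_create_contigs_dict plasmids_dict (create_contigs_dict plasmids_dict)

-- ===== LEMMAS AND PROOFS =====

-- the aggregate of one contig's group, in the exact shape A's inner dict takes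
def pvToA (infos : List (List (String × Int))) : PySem.Dict String Int :=
  PySem.Dict.mk [("length", (PySem.Dict.mk (infos.headD [])).getD "length" 0),
                 ("copies", (infos.map (fun cd => (PySem.Dict.mk cd).getD "copies" 0)).sum)]

-- A's accumulator as a function of B's grouping accumulator (the loop invariant)
def pvFg (g : PySem.Dict String (List (List (String × Int)))) : PySem.Dict String (PySem.Dict String Int) :=
  PySem.Dict.mk (g.items.map (fun p => (p.1, pvToA p.2)))

theorem pvFg_contains (g : PySem.Dict String (List (List (String × Int)))) (k : String) :
    (pvFg g).contains k = g.contains k := by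
  simp [pvFg, PySem.Dict.contains, List.any_map, Function.comp_def]

theorem pvFg_insert (g : PySem.Dict String (List (List (String × Int)))) (k : String) (w : List (List (String × Int))) :
    pvFg (g.insert k w) = (pvFg g).insert k (pvToA w) := by
  by_cases hc : g.contains k = true
  · have hc' : (pvFg g).contains k = true := by rw [pvFg_contains]; exact hc
    apply PySem.Dict.ext
    rw [pvFg]
    rw [PySem.Dict.items_insert_of_contains _ _ hc, PySem.Dict.items_insert_of_contains _ _ hc']
    simp only [pvFg, List.map_map]
    apply List.map_congr_left
    intro p _
    by_cases h : p.1 = k <;> simp [h]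
  · have hc2 := Bool.eq_false_iff.mpr (fun h => hc h)
    have hc' : (pvFg g).contains k = false := by rw [pvFg_contains]; exact hc2
    apply PySem.Dict.ext
    rw [pvFg]
    rw [PySem.Dict.items_insert_of_not_contains _ _ hc2, PySem.Dict.items_insert_of_not_contains _ _ hc']
    simp [pvFg]

theorem pvToA_append (v : List (List (String × Int))) (cd : List (String × Int)) (hv : v ≠ []) :
    (pvToA v).insert "copies" ((pvToA v).getD "copies" 0 + (PySem.Dict.mk cd).getD "copies" 0) = pvToA (v ++ [cd]) := by
  obtain ⟨a, t, rfl⟩ : ∃ a t, v = a :: t := by cases v with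
    | nil => exact absurd rfl hv
    | cons a t => exact ⟨a, t, rfl⟩
  simp [pvToA, PySem.Dict.insert, PySem.Dict.getD, PySem.Dict.get?,
        PySem.Dict.contains]
  ring

theorem pvToA_single (cd : List (String × Int)) :
    (((PySem.Dict.empty.insert "length" ((PySem.Dict.mk cd).getD "length" 0)).insert "copies" 0).insert
        "copies" ((((PySem.Dict.empty.insert "length" ((PySem.Dict.mk cd).getD "length" 0)).insert "copies" 0)).getD "copies" 0 + (PySem.Dict.mk cd).getD "copies" 0)) = pvToA [cd] := by
  simp [pvToA, PySem.Dict.insert, PySem.Dict.getD, PySem.Dict.get?,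
        PySem.Dict.contains, PySem.Dict.empty]

theorem pvStep_comm (g : PySem.Dict String (List (List (String × Int))))
    (cp : String × List (String × Int))
    (hnd : g.keys.Nodup) (hne : ∀ p ∈ g.items, p.2 ≠ []) :
    pvStepA (pvFg g) cp = pvFg (pvStepB g cp) := by
  by_cases hc : g.contains cp.1 = true
  · obtain ⟨v, hv⟩ : ∃ v, g.get? cp.1 = some v := by
      cases h : g.get? cp.1 with
      | none => rw [PySem.Dict.contains_eq_isSome_get?, h] at hc; simp at hc
      | some v => exact ⟨v, rfl⟩
    have hmem : (cp.1, v) ∈ g.items := PySem.Dict.mem_items_of_get?_eq_some g hv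
    have hgetD : g.getD cp.1 [] = v := PySem.Dict.getD_of_mem_items g hmem hnd []
    have hFmem : (cp.1, pvToA v) ∈ (pvFg g).items := by
      simp only [pvFg]
      exact List.mem_map.mpr ⟨(cp.1, v), hmem, rfl⟩
    have hFnd : (pvFg g).keys.Nodup := by
      have : (pvFg g).keys = g.keys := by
        simp [pvFg, PySem.Dict.keys, List.map_map, Function.comp_def]
      rw [this]; exact hnd
    have hFgetD : (pvFg g).getD cp.1 PySem.Dict.empty = pvToA v :=
      PySem.Dict.getD_of_mem_items _ hFmem hFnd _
    have hvne : v ≠ [] := hne _ hmem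
    simp only [pvStepA, pvStepB, pvFg_contains, hc, if_pos, PySem.Dict.modify, hFgetD, hgetD]
    rw [pvToA_append v cp.2 hvne, pvFg_insert]
  · have hc2 := Bool.eq_false_iff.mpr (fun h => hc h)
    have hgetD : g.getD cp.1 [] = [] := PySem.Dict.getD_of_not_contains g [] hc2
    simp only [pvStepA, pvStepB, pvFg_contains, hc2, if_neg, Bool.false_eq_true,
      not_false_iff, PySem.Dict.modify, hgetD]
    rw [PySem.Dict.getD_insert_self, PySem.Dict.insert_insert_self, pvToA_single, pvFg_insert]
    rfl

theorem pvStepB_nodup (g : PySem.Dict String (List (List (String × Int))))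
    (cp : String × List (String × Int)) (hnd : g.keys.Nodup) : (pvStepB g cp).keys.Nodup :=
  PySem.Dict.nodup_keys_insert _ _ _ hnd

theorem pvStepB_ne (g : PySem.Dict String (List (List (String × Int))))
    (cp : String × List (String × Int)) (hne : ∀ p ∈ g.items, p.2 ≠ []) :
    ∀ p ∈ (pvStepB g cp).items, p.2 ≠ [] := by
  intro p hp
  rcases (PySem.Dict.mem_items_insert _ _ _ _).mp hp with h | ⟨h, _⟩
  · subst h; simp
  · exact hne _ h

theorem pvMain (L : List (String × List (String × Int)))
    (g : PySem.Dict String (List (List (String × Int))))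
    (hnd : g.keys.Nodup) (hne : ∀ p ∈ g.items, p.2 ≠ []) :
    L.foldl pvStepA (pvFg g) = pvFg (L.foldl pvStepB g) := by
  induction L generalizing g with
  | nil => rfl
  | cons cp L ih =>
    rw [List.foldl_cons, List.foldl_cons, pvStep_comm g cp hnd hne]
    exact ih _ (pvStepB_nodup g cp hnd) (pvStepB_ne g cp hne)

theorem pvFoldFlat {α β : Type} (f : β → String × List (String × Int) → β)
    (pl : List (α × List (String × List (String × Int)))) (a : β) :
    pl.foldl (fun acc pp => pp.2.foldl f acc) a = (pl.flatMap (·.2)).foldl f a := by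
  induction pl generalizing a with
  | nil => rfl
  | cons pp pl ih => rw [List.foldl_cons, List.flatMap_cons, List.foldl_append, ih]

-- ===== VERDICT (by name: the statement is the Claim_ definition above) =====
theorem create_contigs_dict_spec : Claim_equal_create_contigs_dict := by
  intro pl _ _
  unfold Spec_create_contigs_dict create_contigs_dict create_contigs_dict_alt
  rw [pvFoldFlat pvStepA, pvFoldFlat pvStepB]
  have h0 : (PySem.Dict.empty : PySem.Dict String (PySem.Dict String Int)) = pvFg PySem.Dict.empty := rfl
  rw [h0, pvMain _ _ (by simp [PySem.Dict.keys, PySem.Dict.empty]) (by simp [PySem.Dict.empty])]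
  simp [pvFg, List.map_map, Function.comp_def, pvToA]
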